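-- pv_equiv track=rewrite | github.com/ValentinKlinger/prologin | epreuve_regionale_2023/phi-bonacci.py | phibonacci
-- ===== SOURCE A (Python) =====
-- def phibonacci(n, x):
--     xa = x
--     while len(xa) > 2:
--         xa[-2] += xa[-1]
--         xa[-3] += xa[-1]
--         xa.pop(-1)
--     sortie = ""
--     for i in range(len(xa)):
--         sortie += str(xa[i] % 1000000007) + " "
--     return sortie[:-1]
-- ===== SOURCE B (Python) =====
-- def phibonacci(n, x):
--     # The two survivors of the collapse are Fibonacci-weighted sums of the
--     # original elements (weights Fib(i-1), Fib(i) with Fib(-1)=1, Fib(0)=0);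
--     # only their values mod 1e9+7 reach the output, so reduce as we go.
--     # Return value only: unlike A, this does not mutate x.
--     M = 1000000007
--     if len(x) > 2:
--         fp, fc = 1, 0  # Fib(i-1) % M, Fib(i) % M
--         s0 = 0
--         s1 = 0
--         for v in x:
--             s0 = (s0 + v * fp) % M
--             s1 = (s1 + v * fc) % M
--             fp, fc = fc, (fp + fc) % M
--         xs = [s0, s1]
--     else:
--         xs = x
--     return " ".join(str(v % M) for v in xs)
-- ===== Notes on version B (the rewrite author's own statement) =====
-- stated objective: faster
-- what changed: Replaces the destructive back-to-front collapse loop (which builds Fibonacci-sized bignums) with one forward pass accumulating the two Fibonacci-weighted sums reduced mod 1000000007 at every step, and builds the output with ' '.join instead of concatenate-then-strip; B does not mutate x (A empties it down to 2 elements).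
import Mathlib
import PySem

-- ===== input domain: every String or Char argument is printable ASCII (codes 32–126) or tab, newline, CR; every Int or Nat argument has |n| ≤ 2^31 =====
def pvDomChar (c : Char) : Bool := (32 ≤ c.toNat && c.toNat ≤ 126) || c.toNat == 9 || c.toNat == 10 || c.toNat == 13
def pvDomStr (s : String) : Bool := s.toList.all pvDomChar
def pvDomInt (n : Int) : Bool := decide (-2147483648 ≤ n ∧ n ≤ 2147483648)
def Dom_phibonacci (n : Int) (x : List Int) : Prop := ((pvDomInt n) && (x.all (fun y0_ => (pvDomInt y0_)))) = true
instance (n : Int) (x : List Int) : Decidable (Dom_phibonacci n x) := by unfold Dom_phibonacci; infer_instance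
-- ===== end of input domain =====

-- B replaces A's destructive back-to-front collapse loop (Fibonacci-sized bignums) with one forward
-- pass accumulating the two Fibonacci-weighted sums mod 1000000007, and joins the output instead of
-- strip-after-append. A mutates x in place, B does not: the equivalence is about the RETURN value.


-- ===== PORT A =====
-- 'while len(xa) > 2: xa[-2] += xa[-1]; xa[-3] += xa[-1]; xa.pop(-1)':
-- one iteration turns the last three entries c, b, a into c+a, b+a (the prefix is untouched).
def phibonacciLoop (xa : List Int) : List Int :=
  if _h : 2 < xa.length then
    phibonacciLoop (xa.take (xa.length - 3) ++
      [((PySem.List.pyGet? xa (-3)).getD 0) + ((PySem.List.pyGet? xa (-1)).getD 0),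
       ((PySem.List.pyGet? xa (-2)).getD 0) + ((PySem.List.pyGet? xa (-1)).getD 0)])
  else xa
termination_by xa.length
decreasing_by simp; omega

def phibonacci (n : Int) (x : List Int) : String :=
  let xa := phibonacciLoop x
  -- sortie += str(xa[i] % 1000000007) + " "  (string work done on List Char, per the PySem convention)
  let sortie : List Char :=
    xa.foldl (fun s v => s ++ (PySem.Int.toChars (PySem.Int.mod v 1000000007) ++ [' '])) []
  -- return sortie[:-1]
  String.ofList (PySem.Chars.slice sortie none (some (-1)))

-- ===== PORT B =====
-- loop body: s0 = (s0 + v*fp) % M; s1 = (s1 + v*fc) % M; fp, fc = fc, (fp+fc) % M   (state (fp, fc, s0, s1))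
def phibStep (st : Int × Int × Int × Int) (v : Int) : Int × Int × Int × Int :=
  (st.2.1, PySem.Int.mod (st.1 + st.2.1) 1000000007,
   PySem.Int.mod (st.2.2.1 + v * st.1) 1000000007,
   PySem.Int.mod (st.2.2.2 + v * st.2.1) 1000000007)

def phibonacci_alt (n : Int) (x : List Int) : String :=
  let xs :=
    if 2 < x.length then
      let st := x.foldl phibStep (1, 0, 0, 0)
      [st.2.2.1, st.2.2.2]
    else x
  -- " ".join(str(v % 1000000007) for v in x)
  String.ofList (PySem.Chars.join [' ']
    (xs.map (fun v => PySem.Int.toChars (PySem.Int.mod v 1000000007))))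

-- ===== PRECONDITION & SPEC =====
def Spec_phibonacci (n : Int) (x : List Int) (out : String) : Prop := out = phibonacci_alt n x
instance (n : Int) (x : List Int) (out : String) : Decidable (Spec_phibonacci n x out) := by unfold Spec_phibonacci; infer_instance

-- ===== CLAIM (what is proved, stated in full; the proofs are below) =====
def Claim_equal_phibonacci : Prop := ∀ (n : Int) (x : List Int), Dom_phibonacci n x → Spec_phibonacci n x (phibonacci n x)

-- ===== LEMMAS AND PROOFS =====

-- A's collapse result, characterised as EXACT (unreduced) Fibonacci-weighted sums
def phibStepExact (st : Int × Int × Int × Int) (v : Int) : Int × Int × Int × Int :=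
  (st.2.1, st.1 + st.2.1, st.2.2.1 + v * st.1, st.2.2.2 + v * st.2.1)

def phibSums (xs : List Int) : List Int :=
  let st := xs.foldl phibStepExact (1, 0, 0, 0)
  [st.2.2.1, st.2.2.2]

-- one collapse step preserves the two weighted sums (any start state)
lemma phibStepExact_inv (l : List Int) (c b a : Int) (st : Int × Int × Int × Int) :
    ((List.foldl phibStepExact st (l ++ [c, b, a])).2.2.1,
     (List.foldl phibStepExact st (l ++ [c, b, a])).2.2.2) =
    ((List.foldl phibStepExact st (l ++ [c + a, b + a])).2.2.1,
     (List.foldl phibStepExact st (l ++ [c + a, b + a])).2.2.2) := by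
  simp only [List.foldl_append]
  obtain ⟨fp, fc, s0, s1⟩ := List.foldl phibStepExact st l
  simp [phibStepExact]; constructor <;> ring

-- a two-element list is its own pair of weighted sums
lemma phibSums_pair (p q : Int) : phibSums [p, q] = [p, q] := by
  simp [phibSums, phibStepExact]

-- decomposition of a list of length ≥ 3 into prefix ++ last three
lemma decomp (xs : List Int) (h : 2 < xs.length) :
    xs = xs.take (xs.length - 3) ++
      [xs[xs.length - 3]'(by omega), xs[xs.length - 2]'(by omega), xs[xs.length - 1]'(by omega)] := by
  have e := List.take_append_drop (xs.length - 3) xs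
  rw [List.drop_eq_getElem_cons (by omega),
      show xs.length - 3 + 1 = xs.length - 2 from by omega,
      List.drop_eq_getElem_cons (by omega),
      show xs.length - 2 + 1 = xs.length - 1 from by omega,
      List.drop_eq_getElem_cons (by omega),
      show xs.length - 1 + 1 = xs.length from by omega,
      List.drop_length] at e
  exact e.symm

-- the loop computes exactly B's weighted sums (for length ≥ 3; below that it is the identity)
lemma loop_eq_sums_aux : ∀ (L : Nat) (xs : List Int), xs.length = L → 2 < xs.length →
    phibonacciLoop xs = phibSums xs := by
  intro L
  induction L using Nat.strong_induction_on with
  | _ L IH =>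
    intro xs hL h
    obtain ⟨ys, c, b, a, hdec⟩ : ∃ ys c b a, xs = ys ++ [c, b, a] :=
      ⟨_, _, _, _, decomp xs h⟩
    subst hdec
    rw [phibonacciLoop, dif_pos h]
    have harg : ((ys ++ [c, b, a]).take ((ys ++ [c, b, a]).length - 3) ++
        [((PySem.List.pyGet? (ys ++ [c, b, a]) (-3)).getD 0) +
           ((PySem.List.pyGet? (ys ++ [c, b, a]) (-1)).getD 0),
         ((PySem.List.pyGet? (ys ++ [c, b, a]) (-2)).getD 0) +
           ((PySem.List.pyGet? (ys ++ [c, b, a]) (-1)).getD 0)]) = ys ++ [c + a, b + a] := by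
      simp [PySem.List.pyGet?, PySem.List.pyIdx?]
    rw [harg]
    have hrec : phibonacciLoop (ys ++ [c + a, b + a]) = phibSums (ys ++ [c + a, b + a]) := by
      cases ys with
      | nil => rw [phibonacciLoop]; simp [phibSums_pair]
      | cons y ys' =>
        refine IH ((y :: ys') ++ [c + a, b + a]).length (by simp at hL ⊢; omega) _ rfl (by simp)
    rw [hrec]
    have hinv := phibStepExact_inv ys c b a ((1 : Int), (0 : Int), (0 : Int), (0 : Int))
    have h1 := congrArg Prod.fst hinv
    have h2 := congrArg Prod.snd hinv
    simp only [phibSums]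
    simp only at h1 h2
    rw [← h1, ← h2]

-- joining ≤ 2 pieces equals append-with-separator then drop the trailing separator
lemma join_eq_strip (l : List Int) (hl : l.length ≤ 2) :
    PySem.Chars.slice
      (l.foldl (fun s v => s ++ (PySem.Int.toChars (PySem.Int.mod v 1000000007) ++ [' '])) [])
      none (some (-1)) =
    PySem.Chars.join [' '] (l.map (fun v => PySem.Int.toChars (PySem.Int.mod v 1000000007))) := by
  match l, hl with
  | [], _ =>
      simp [PySem.Chars.join, List.intercalate, PySem.Chars.slice_eq_listSlice,
        PySem.List.slice_to_neg_one]
  | [p], _ =>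
      simp [PySem.Chars.join, List.intercalate, PySem.Chars.slice_eq_listSlice,
        PySem.List.slice_to_neg_one]
  | [p, q], _ =>
      simp only [List.foldl, List.map, PySem.Chars.join, PySem.Chars.slice_eq_listSlice,
        PySem.List.slice_to_neg_one, List.nil_append]
      rw [← List.append_assoc, List.dropLast_concat]
      simp [List.intercalate]

-- the reduced fold agrees with the exact fold mod 1000000007, componentwise
lemma fold_mod (l : List Int) :
    ∀ (st st' : Int × Int × Int × Int),
      st.1 ≡ st'.1 [ZMOD 1000000007] → st.2.1 ≡ st'.2.1 [ZMOD 1000000007] →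
      st.2.2.1 ≡ st'.2.2.1 [ZMOD 1000000007] → st.2.2.2 ≡ st'.2.2.2 [ZMOD 1000000007] →
      (List.foldl phibStepExact st l).2.2.1 ≡ (List.foldl phibStep st' l).2.2.1 [ZMOD 1000000007] ∧
      (List.foldl phibStepExact st l).2.2.2 ≡ (List.foldl phibStep st' l).2.2.2 [ZMOD 1000000007] := by
  induction l with
  | nil => exact fun st st' _ _ h3 h4 => ⟨h3, h4⟩
  | cons v t ih =>
      intro st st' h1 h2 h3 h4
      simp only [List.foldl_cons]
      apply ih <;> simp only [phibStep, phibStepExact]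
      · exact h2
      · exact ((h1.add h2).trans
          (Int.ModEq.symm (Int.emod_emod_of_dvd _ dvd_rfl))).trans
          (by rw [PySem.Int.mod_eq_emod_of_pos (by norm_num)])
      · exact ((h3.add (Int.ModEq.mul_left v h1)).trans
          (Int.ModEq.symm (Int.emod_emod_of_dvd _ dvd_rfl))).trans
          (by rw [PySem.Int.mod_eq_emod_of_pos (by norm_num)])
      · exact ((h4.add (Int.ModEq.mul_left v h2)).trans
          (Int.ModEq.symm (Int.emod_emod_of_dvd _ dvd_rfl))).trans
          (by rw [PySem.Int.mod_eq_emod_of_pos (by norm_num)])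

-- ===== VERDICT (by name: the statement is the Claim_ definition above) =====
theorem phibonacci_spec : Claim_equal_phibonacci := by
  intro n x _
  unfold Spec_phibonacci phibonacci phibonacci_alt
  by_cases h : 2 < x.length
  · rw [loop_eq_sums_aux x.length x rfl h, if_pos h]
    dsimp only
    rw [join_eq_strip (phibSums x) (by simp [phibSums])]
    have hm := fold_mod x (1, 0, 0, 0) (1, 0, 0, 0)
      (Int.ModEq.refl _) (Int.ModEq.refl _) (Int.ModEq.refl _) (Int.ModEq.refl _)
    simp only [phibSums, List.map]
    rw [PySem.Int.mod_eq_emod_of_pos (b := (1000000007 : Int)) (by norm_num),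
        PySem.Int.mod_eq_emod_of_pos (b := (1000000007 : Int)) (by norm_num),
        PySem.Int.mod_eq_emod_of_pos (b := (1000000007 : Int)) (by norm_num),
        PySem.Int.mod_eq_emod_of_pos (b := (1000000007 : Int)) (by norm_num),
        hm.1, hm.2]
  · rw [show phibonacciLoop x = x from by rw [phibonacciLoop]; simp [h], if_neg h]
    exact congrArg String.ofList (join_eq_strip x (by omega))
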